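-- pv_equiv track=rewrite | github.com/KrayMakso68/quiztes | main/views.py | split_questions
-- ===== SOURCE A (Python) =====
-- def split_questions(all_que, parts):
--     if all_que < parts:
--         list_of_questions = [0] * parts
--         for i in range(all_que):
--             list_of_questions[i] = 1
--         return list_of_questions
--     elif all_que % parts == 0:
--         list_of_questions = [all_que // parts for i in range(parts)]
--         return list_of_questions
--     else:
--         list_of_questions = []
--         zp = parts - (all_que % parts)
--         pp = all_que // parts
--         for i in range(parts):
--             if i >= zp:
--                 list_of_questions.append(pp + 1)
--             else:
--                 list_of_questions.append(pp)
--         list_of_questions.reverse()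
--         return list_of_questions
-- ===== SOURCE B (Python) =====
-- def split_questions(all_que, parts):
--     if all_que < 0:
--         return [0] * parts
--     result = []
--     remaining, left = all_que, parts
--     while left > 0:
--         head = -(-remaining // left)          # ceiling division
--         result.append(head)
--         remaining -= head
--         left -= 1
--     return result
-- ===== Notes on version B (the rewrite author's own statement) =====
-- stated objective: alternative
-- what changed: Replaces A's three-way branch (fill-loop / comprehension / append-loop+reverse over divmod blocks) by a single while loop that repeatedly peels off ceil(remaining/left) questions for the next part, with a negative-count guard as the only special case.
import Mathlib
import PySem

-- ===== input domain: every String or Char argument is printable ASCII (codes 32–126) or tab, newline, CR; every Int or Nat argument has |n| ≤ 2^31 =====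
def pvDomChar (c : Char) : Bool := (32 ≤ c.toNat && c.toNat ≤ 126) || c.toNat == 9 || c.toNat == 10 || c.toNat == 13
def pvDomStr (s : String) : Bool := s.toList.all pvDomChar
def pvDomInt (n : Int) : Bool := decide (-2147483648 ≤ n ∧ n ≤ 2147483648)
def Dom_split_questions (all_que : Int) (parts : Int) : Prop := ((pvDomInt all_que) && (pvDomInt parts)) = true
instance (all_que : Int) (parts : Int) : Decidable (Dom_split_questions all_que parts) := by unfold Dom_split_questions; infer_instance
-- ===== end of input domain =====

-- B replaces A's three branch-specific loops by one loop peeling off ceil(remaining/left) per part (objective: alternative).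


-- ===== PORT A =====
def split_questions (all_que : Int) (parts : Int) : List Int :=
  if all_que < parts then
    -- list_of_questions = [0] * parts; for i in range(all_que): list_of_questions[i] = 1
    let list_of_questions := List.replicate parts.toNat (0 : Int)
    (PySem.List.pyRange 0 all_que 1).foldl
      (fun acc i => PySem.List.pySetD acc i (1 : Int)) list_of_questions
  else if PySem.Int.mod all_que parts = 0 then
    (PySem.List.pyRange 0 parts 1).map (fun _ => PySem.Int.floordiv all_que parts)
  else
    let zp := parts - PySem.Int.mod all_que parts
    let pp := PySem.Int.floordiv all_que parts
    let list_of_questions :=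
      (PySem.List.pyRange 0 parts 1).foldl
        (fun acc i => acc ++ [if i ≥ zp then pp + 1 else pp]) []
    list_of_questions.reverse

-- ===== PORT B =====
-- the while loop: each pass takes ceil(remaining/left) questions for the next part
def pvAltLoop (remaining : Int) (left : Int) (result : List Int) : List Int :=
  if 0 < left then
    let head := -(PySem.Int.floordiv (-remaining) left)   -- ceiling division
    pvAltLoop (remaining - head) (left - 1) (result ++ [head])
  else result
termination_by left.toNat
decreasing_by omega

def split_questions_alt (all_que : Int) (parts : Int) : List Int :=
  if all_que < 0 then
    List.replicate parts.toNat (0 : Int)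
  else
    pvAltLoop all_que parts []

-- ===== PRECONDITION & SPEC =====
-- Pre_ excludes exactly the inputs where Python A raises ZeroDivisionError
-- (parts == 0 with all_que ≥ parts, i.e. 0 ≤ all_que).
def Pre_split_questions (all_que : Int) (parts : Int) : Prop :=
  ¬ (parts = 0 ∧ 0 ≤ all_que)
instance (all_que : Int) (parts : Int) : Decidable (Pre_split_questions all_que parts) := by
  unfold Pre_split_questions; infer_instance

def pvWitness_split_questions : Int × Int := (10, 3)

def Spec_split_questions (all_que : Int) (parts : Int) (out : List Int) : Prop := out = split_questions_alt all_que parts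
instance (all_que : Int) (parts : Int) (out : List Int) : Decidable (Spec_split_questions all_que parts out) := by unfold Spec_split_questions; infer_instance

-- ===== CLAIM (what is proved, stated in full; the proofs are below) =====
def Claim_equal_split_questions : Prop := ∀ (all_que : Int) (parts : Int), Dom_split_questions all_que parts → Pre_split_questions all_que parts → Spec_split_questions all_que parts (split_questions all_que parts)

-- ===== LEMMAS AND PROOFS =====

-- branch 1 of A: the index-assignment loop fills a 1-prefix of the zero list
lemma pv_set_loop (n p : Nat) (h : n ≤ p) :
    (List.range n).foldl (fun acc i => acc.set i (1 : Int)) (List.replicate p (0 : Int))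
      = List.replicate n (1 : Int) ++ List.replicate (p - n) (0 : Int) := by
  induction n with
  | zero => simp
  | succ m ih =>
    rw [List.range_succ, List.foldl_append, ih (by omega)]
    simp only [List.foldl_cons, List.foldl_nil]
    have hrep : List.replicate (p - m) (0 : Int)
        = (0 : Int) :: List.replicate (p - (m + 1)) (0 : Int) := by
      have h2 : p - m = (p - (m + 1)) + 1 := by omega
      rw [h2, List.replicate_succ]
    rw [hrep]
    rw [List.set_append_right (s := List.replicate m (1 : Int))
      (t := (0 : Int) :: List.replicate (p - (m + 1)) (0 : Int)) m (1 : Int) (by simp)]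
    simp [List.replicate_succ']

-- branch 3 of A: the append loop with per-index conditional builds two replicate blocks
lemma pv_append_loop (zp a b : Int) (p : Nat) (hzp : 0 ≤ zp) :
    (List.range p).foldl
        (fun acc (i : Nat) => acc ++ [if (i : Int) ≥ zp then a else b]) []
      = List.replicate (min zp.toNat p) b ++ List.replicate (p - zp.toNat) a := by
  induction p with
  | zero => simp
  | succ m ih =>
    rw [List.range_succ, List.foldl_append, ih]
    simp only [List.foldl_cons, List.foldl_nil]
    by_cases hc : zp ≤ (m : Int)
    · have h1 : min zp.toNat m = zp.toNat := by omega
      have h2 : min zp.toNat (m + 1) = zp.toNat := by omega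
      have h3 : (m + 1) - zp.toNat = (m - zp.toNat) + 1 := by omega
      rw [if_pos (by exact_mod_cast hc), h1, h2, h3, List.append_assoc,
        ← List.replicate_succ' (n := m - zp.toNat)]
    · have h1 : min zp.toNat m = m := by omega
      have h2 : min zp.toNat (m + 1) = m + 1 := by omega
      have h3 : m - zp.toNat = 0 := by omega
      have h4 : (m + 1) - zp.toNat = 0 := by omega
      rw [if_neg (by exact_mod_cast hc), h1, h2, h3, h4]
      simp [List.replicate_succ']

-- B's loop computes the divmod closed form: (n mod p) copies of n//p + 1, then n//p everywhere else
lemma pv_alt_closed (k : Nat) : ∀ (acc : List Int) (n : Int), 0 ≤ n →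
    pvAltLoop n ((k : Int) + 1) acc
      = acc
        ++ List.replicate (PySem.Int.mod n ((k : Int) + 1)).toNat
          (PySem.Int.floordiv n ((k : Int) + 1) + 1)
        ++ List.replicate (((k : Int) + 1) - PySem.Int.mod n ((k : Int) + 1)).toNat
          (PySem.Int.floordiv n ((k : Int) + 1)) := by
  induction k with
  | zero =>
    intro acc n hn
    rw [pvAltLoop]
    split_ifs with h1
    · have hhead : -(PySem.Int.floordiv (-n) (((0 : Nat) : Int) + 1)) = n := by
        rw [PySem.Int.neg_floordiv_neg_eq_iff_of_pos (by omega)]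
        constructor <;> (push_cast; nlinarith)
      simp only [hhead]
      rw [pvAltLoop]
      rw [if_neg (by omega)]
      rw [PySem.Int.mod_eq_emod_of_pos (by omega),
          PySem.Int.floordiv_eq_ediv_of_pos (by omega)]
      push_cast
      simp
    · exact absurd (by omega : (0 : Int) < ((0 : Nat) : Int) + 1) h1
  | succ k ih =>
    intro acc n hn
    have hP : (0 : Int) < ((k + 1 : Nat) : Int) + 1 := by omega
    set P : Int := ((k + 1 : Nat) : Int) + 1 with hPdef
    have hP2 : P = (k : Int) + 2 := by rw [hPdef]; push_cast; ring
    rw [pvAltLoop, if_pos hP]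
    have hq0 : 0 ≤ n / P := Int.ediv_nonneg hn (by omega)
    have hqr : P * (n / P) + n % P = n := Int.mul_ediv_add_emod n P
    have hr0 : 0 ≤ n % P := Int.emod_nonneg n (by omega)
    have hrP : n % P < P := Int.emod_lt_of_pos n hP
    set q : Int := n / P with hq
    set r : Int := n % P with hr
    have harg : P - 1 = ((k : Nat) : Int) + 1 := by omega
    by_cases hz : r = 0
    · -- remainder 0: head = q, rest is q * (P-1) split over P-1 parts
      have hhead : -(PySem.Int.floordiv (-n) P) = q := by
        rw [PySem.Int.neg_floordiv_neg_eq_iff_of_pos hP]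
        constructor <;> nlinarith
      simp only [hhead]
      have hrec : n - q = 0 + q * ((k : Int) + 1) := by nlinarith
      rw [harg, ih (acc ++ [q]) (n - q) (by nlinarith)]
      rw [PySem.Int.mod_eq_emod_of_pos (by omega),
          PySem.Int.floordiv_eq_ediv_of_pos (by omega)]
      rw [hrec, Int.add_mul_ediv_right _ _ (by omega),
          Int.add_mul_emod_self_right, Int.zero_ediv, Int.zero_emod, zero_add]
      rw [PySem.Int.mod_eq_emod_of_pos hP, PySem.Int.floordiv_eq_ediv_of_pos hP, ← hq, ← hr, hz]
      have h1 : ((0 : Int)).toNat = 0 := rfl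
      have h2 : (((k : Nat) : Int) + 1 - 0).toNat = k + 1 := by omega
      have h3 : (P - 0).toNat = k + 2 := by omega
      rw [h1, h2, h3]
      simp [List.replicate_succ]
    · -- remainder r > 0: head = q + 1, rest is q * (P-1) + (r-1) over P-1 parts
      have hr1 : 1 ≤ r := by omega
      have hhead : -(PySem.Int.floordiv (-n) P) = q + 1 := by
        rw [PySem.Int.neg_floordiv_neg_eq_iff_of_pos hP]
        constructor <;> nlinarith
      simp only [hhead]
      have hrec : n - (q + 1) = (r - 1) + q * ((k : Int) + 1) := by nlinarith
      rw [harg, ih (acc ++ [q + 1]) (n - (q + 1)) (by nlinarith)]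
      rw [PySem.Int.mod_eq_emod_of_pos (by omega),
          PySem.Int.floordiv_eq_ediv_of_pos (by omega)]
      rw [hrec, Int.add_mul_ediv_right _ _ (by omega),
          Int.add_mul_emod_self_right,
          Int.ediv_eq_zero_of_lt (by omega) (by omega), zero_add,
          Int.emod_eq_of_lt (by omega) (by omega)]
      rw [PySem.Int.mod_eq_emod_of_pos hP, PySem.Int.floordiv_eq_ediv_of_pos hP, ← hq, ← hr]
      have h1 : r.toNat = (r - 1).toNat + 1 := by omega
      have h2 : (P - r).toNat = (((k : Nat) : Int) + 1 - (r - 1)).toNat := by omega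
      rw [h1, h2, List.replicate_succ]
      simp

theorem split_questions_spec : Claim_equal_split_questions := by
  intro n p _hdom hpre
  unfold Spec_split_questions split_questions
  by_cases hneg : n < 0
  · -- negative question count: both sides are [0] * parts ([] when parts < 0)
    rw [split_questions_alt.eq_def, if_pos hneg]
    by_cases h1 : n < p
    · rw [if_pos h1, PySem.List.pyRange_one_eq_nil (by omega)]
      simp
    · rw [if_neg h1]
      have hp0 : p.toNat = 0 := by omega
      by_cases hm : PySem.Int.mod n p = 0
      · rw [if_pos hm, PySem.List.pyRange_one_eq_nil (by omega)]
        simp [hp0]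
      · rw [if_neg hm, PySem.List.pyRange_one_eq_nil (by omega)]
        simp [hp0]
  · by_cases hp : p ≤ 0
    · -- 0 ≤ n, p < 0 (p = 0 is excluded by Pre_): both sides are []
      have hplt : p < 0 := by
        rcases lt_or_eq_of_le hp with h | h
        · exact h
        · exact absurd ⟨h, by omega⟩ hpre
      rw [split_questions_alt.eq_def, if_neg hneg, pvAltLoop, if_neg (by omega : ¬ (0 : Int) < p),
          if_neg (by omega : ¬ n < p)]
      by_cases hm : PySem.Int.mod n p = 0
      · rw [if_pos hm, PySem.List.pyRange_one_eq_nil (by omega)]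
        simp
      · rw [if_neg hm, PySem.List.pyRange_one_eq_nil (by omega)]
        simp
    · -- 0 ≤ n, 0 < p: rewrite both sides to the divmod closed form
      have hppos : 0 < p := by omega
      have hk : p = ((p.toNat - 1 : Nat) : Int) + 1 := by omega
      have halt := pv_alt_closed (p.toNat - 1) [] n (by omega)
      rw [← hk] at halt
      rw [split_questions_alt.eq_def, if_neg hneg, halt, List.nil_append]
      by_cases h1 : n < p
      · -- A branch 1: q = 0, r = n
        rw [if_pos h1]
        have hq : PySem.Int.floordiv n p = 0 := by
          rw [PySem.Int.floordiv_eq_ediv_of_pos hppos]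
          exact Int.ediv_eq_zero_of_lt (by omega) h1
        have hr : PySem.Int.mod n p = n := by
          rw [PySem.Int.mod_eq_emod_of_pos hppos]
          exact Int.emod_eq_of_lt (by omega) h1
        rw [hq, hr]
        by_cases h0 : n ≤ 0
        · have hn0 : n = 0 := by omega
          rw [PySem.List.pyRange_one_eq_nil h0, hn0]
          simp
        · rw [PySem.List.pyRange_one]
          rw [List.foldl_map]
          have hbody : ∀ (acc : List Int) (k : Nat),
              PySem.List.pySetD acc ((0 : Int) + (k : Int)) (1 : Int) = acc.set k 1 := by
            intro acc k
            rw [zero_add, PySem.List.pySetD_natCast]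
          simp only [hbody, Int.sub_zero]
          rw [pv_set_loop n.toNat p.toNat (by omega)]
          have h2 : (p - n).toNat = p.toNat - n.toNat := by omega
          rw [h2]
          norm_num
      · rw [if_neg h1]
        by_cases hm : PySem.Int.mod n p = 0
        · -- A branch 2: r = 0, p equal parts
          rw [if_pos hm, hm]
          simp [List.map_const', PySem.List.length_pyRange_one]
        · -- A branch 3: the reversed conditional-append loop
          rw [if_neg hm]
          have hge := PySem.Int.mod_nonneg hppos (a := n)
          have hlt := PySem.Int.mod_lt hppos (a := n)
          rw [PySem.List.pyRange_one]
          simp only [List.foldl_map, zero_add, Int.sub_zero]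
          rw [pv_append_loop (p - PySem.Int.mod n p) _ _ p.toNat (by omega)]
          set r := PySem.Int.mod n p with hrdef
          have hmin : min (p - r).toNat p.toNat = (p - r).toNat := by omega
          have hsub : p.toNat - (p - r).toNat = r.toNat := by omega
          rw [hmin, hsub, List.reverse_append, List.reverse_replicate, List.reverse_replicate]
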